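-- pv_equiv track=rewrite | github.com/rnaster/Today-I-Learned | 2020/2009/200912.py | solution
-- ===== SOURCE A (Python) =====
-- def solution(food_times, k):
--     if sum(food_times) <= k: return -1
--     n = len(food_times)
--     arr = [[i for i in range(1, n + 1)], [i for i in range(-1, n - 1)]]
--     arr[0][-1] = 0
--     arr[1][0] = n - 1
--     t = 0
--     cnt = n
--     for i, v in sorted(enumerate(food_times), key=lambda x: x[1]):
--         v -= t
--         if k >= v * cnt:
--             k -= v * cnt
--             t += v
--             cnt -= 1
--             arr[0][arr[1][i]] = arr[0][i]
--             arr[1][arr[0][i]] = arr[1][i]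
--         else:
--             k %= cnt
--             l = [0] * cnt
--             for j in range(cnt):
--                 l[j] = i
--                 i = arr[0][i]
--             l.sort()
--             return l[k] + 1
-- ===== SOURCE B (Python) =====
-- def solution(food_times, k):
--     # Binary-search the highest fully-eaten level p (sum(min(f,p)) <= k),
--     # then read the answer off the still-positive foods. No sorting at all.
--     if sum(food_times) <= k:
--         return -1
--     n = len(food_times)
--
--     def cost(q):
--         return sum(min(f, q) for f in food_times)
--
--     lo = min(min(food_times), k // n)
--     hi = max(food_times)
--     while lo < hi:
--         mid = (lo + hi + 1) // 2
--         if cost(mid) <= k: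
--             lo = mid
--         else:
--             hi = mid - 1
--     survivors = [i for i, f in enumerate(food_times) if f > lo]
--     return survivors[k - cost(lo)] + 1
-- ===== Notes on version B (the rewrite author's own statement) =====
-- stated objective: alternative
-- what changed: A sorts the foods by time and peels them off one by one with a hand-rolled circular doubly-linked list; B never sorts: it binary-searches the highest fully-eaten level p with sum(min(f,p)) <= k and reads the answer directly off the foods still above p.
-- outside the precondition, e.g. on solution([], -1): A raises IndexError, B raises ValueError
import Mathlib
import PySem

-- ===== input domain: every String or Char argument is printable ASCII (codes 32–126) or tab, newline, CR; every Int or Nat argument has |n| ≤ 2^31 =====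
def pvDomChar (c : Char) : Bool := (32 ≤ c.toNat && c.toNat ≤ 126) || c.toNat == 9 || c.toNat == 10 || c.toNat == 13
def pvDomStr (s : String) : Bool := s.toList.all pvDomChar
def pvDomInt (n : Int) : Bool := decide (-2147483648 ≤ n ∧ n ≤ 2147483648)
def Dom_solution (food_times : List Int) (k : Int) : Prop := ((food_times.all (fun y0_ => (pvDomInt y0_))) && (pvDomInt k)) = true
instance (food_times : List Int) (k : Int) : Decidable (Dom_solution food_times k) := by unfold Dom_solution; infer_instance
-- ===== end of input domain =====

-- B drops A's sort + circular doubly-linked-list bookkeeping entirely and instead binary-searches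
-- the highest fully-eaten level p with sum(min(f,p)) <= k, reading the answer off the foods still
-- above p (objective: alternative algorithm, no sorting).

-- ===== PORT A =====
-- the inner `for j in range(cnt): l[j] = i; i = arr[0][i]` walk
def pvCollect (a0 : List Int) : Nat → Int → List Int
  | 0, _ => []
  | m + 1, i => i :: pvCollect a0 m (PySem.List.pyGetD a0 i 0)

def pvLoopA : List (Int × Int) → Int → Int → Int → List Int → List Int → Int
  | [], _, _, _, _, _ => -1  -- Python's for-loop falls through (returns None); unreachable under Pre_
  | (i, v0) :: rest, k, t, cnt, a0, a1 =>
    let v := v0 - t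
    if v * cnt ≤ k then
      let a0' := PySem.List.pySetD a0 (PySem.List.pyGetD a1 i 0) (PySem.List.pyGetD a0 i 0)
      let a1' := PySem.List.pySetD a1 (PySem.List.pyGetD a0' i 0) (PySem.List.pyGetD a1 i 0)
      pvLoopA rest (k - v * cnt) (t + v) (cnt - 1) a0' a1'
    else
      PySem.List.pyGetD (PySem.List.sorted (pvCollect a0 cnt.toNat i) (fun x => x) false)
        (PySem.Int.mod k cnt) 0 + 1

def solution (food_times : List Int) (k : Int) : Int :=
  if food_times.sum ≤ k then -1
  else
    let n : Int := food_times.length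
    match PySem.List.pySet? (PySem.List.pyRange 1 (n + 1) 1) (-1) (0 : Int) with
    | none => 0  -- `arr[0][-1] = 0` raises IndexError in Python (only when n = 0); outside Pre_
    | some a0 =>
      match PySem.List.pySet? (PySem.List.pyRange (-1) (n - 1) 1) 0 (n - 1) with
      | none => 0  -- unreachable: n = 0 already caught above
      | some a1 =>
        pvLoopA (PySem.List.sorted (PySem.List.enumerate food_times 0) (fun x => x.2) false)
          k 0 n a0 a1

-- ===== PORT B =====
-- cost(q) = sum(min(f, q) for f in food_times)
def pvCost (food_times : List Int) (q : Int) : Int :=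
  (food_times.map (fun f => min f q)).sum

-- midpoint bounds for the while-loop's termination (cited by `decreasing_by` below)
lemma pvBS_mid (lo hi : Int) (h : lo < hi) :
    lo < PySem.Int.floordiv (lo + hi + 1) 2 ∧ PySem.Int.floordiv (lo + hi + 1) 2 ≤ hi := by
  constructor
  · have h1 := (PySem.Int.le_floordiv_iff_mul_le (a := lo + hi + 1) (b := 2) (q := lo + 1)
      (by norm_num)).mpr (by omega)
    omega
  · have h2 := (PySem.Int.floordiv_lt_iff_lt_mul (a := lo + hi + 1) (b := 2) (q := hi + 1)
      (by norm_num)).mpr (by omega)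
    omega

-- the `while lo < hi` binary search of Source B
def pvBS (food_times : List Int) (k lo hi : Int) : Int :=
  if h : lo < hi then
    let mid := PySem.Int.floordiv (lo + hi + 1) 2
    if pvCost food_times mid ≤ k then pvBS food_times k mid hi
    else pvBS food_times k lo (mid - 1)
  else lo
termination_by (hi - lo).toNat
decreasing_by
  · have := pvBS_mid lo hi h; omega
  · have := pvBS_mid lo hi h; omega

def solution_alt (food_times : List Int) (k : Int) : Int :=
  if food_times.sum ≤ k then -1
  else
    let n : Int := food_times.length
    -- min(food_times)/max(food_times): the list is nonempty here, so the `getD 0` default is never used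
    let lo := min ((PySem.List.min? food_times (fun x => x)).getD 0) (PySem.Int.floordiv k n)
    let hi := (PySem.List.max? food_times (fun x => x)).getD 0
    let p := pvBS food_times k lo hi
    let survivors := ((PySem.List.enumerate food_times 0).filter (fun x => decide (p < x.2))).map Prod.fst
    -- survivors[k - cost(lo)]: the index is proved in range, so pyGetD's default is never used
    PySem.List.pyGetD survivors (k - pvCost food_times p) 0 + 1

-- ===== PRECONDITION & SPEC =====
-- Pre_ excludes only empty food_times with k < 0: there A's guard does not fire and
-- `arr[0][-1] = 0` raises IndexError on the empty list (B's `min(food_times)` raises too).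
def Pre_solution (food_times : List Int) (k : Int) : Prop := food_times = [] → 0 ≤ k
instance (food_times : List Int) (k : Int) : Decidable (Pre_solution food_times k) := by
  unfold Pre_solution; infer_instance
def pvWitness_solution : List Int × Int := ([3, 1, 2], 5)

def Spec_solution (food_times : List Int) (k : Int) (out : Int) : Prop := out = solution_alt food_times k
instance (food_times : List Int) (k : Int) (out : Int) : Decidable (Spec_solution food_times k out) := by
  unfold Spec_solution; infer_instance

-- ===== CLAIM (what is proved, stated in full; the proofs are below) =====
def Claim_equal_solution : Prop := ∀ (food_times : List Int) (k : Int), Dom_solution food_times k → Pre_solution food_times k → Spec_solution food_times k (solution food_times k)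

-- ===== LEMMAS AND PROOFS =====

-- A's sorted scan, distilled: the intermediate form both ports are related to.
def pvScan : List (Int × Int) → Int → Int → Int
  | [], _, _ => -1
  | (i, tv) :: rest, k, previous =>
    let remaining : Int := (((i, tv) :: rest).length : Int)
    let need := (tv - previous) * remaining
    if need ≤ k then pvScan rest (k - need) tv
    else
      PySem.List.pyGetD (PySem.List.sorted (((i, tv) :: rest).map Prod.fst) (fun x => x) false)
        (PySem.Int.mod k remaining) 0 + 1

-- cyclic successor / predecessor of j in the strictly increasing list S
def cycNext (S : List Int) (j : Int) : Int :=
  (S.filter (fun s => decide (j < s))).headD (S.headD 0)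
def cycPrev (S : List Int) (j : Int) : Int :=
  ((S.filter (fun s => decide (s < j))).getLast?).getD ((S.getLast?).getD 0)
-- the survivors in pointer order starting at j
def cyc (S : List Int) (j : Int) : List Int :=
  S.filter (fun s => decide (j ≤ s)) ++ S.filter (fun s => decide (s < j))


lemma filter_partition (S : List Int) (i : Int) (h : S.Pairwise (· < ·)) :
    S = S.filter (fun s => decide (s < i)) ++ S.filter (fun s => decide (i ≤ s)) := by
  induction S with
  | nil => simp
  | cons a S ih =>
    rw [List.pairwise_cons] at h
    by_cases ha : a < i
    · have h2 : ¬ (i ≤ a) := by omega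
      simp only [List.filter_cons, ha, decide_true, h2, decide_false, if_true, if_false,
        cond_true, cond_false]
      simpa using ih h.2
    · have hle : i ≤ a := by omega
      have h2 : S.filter (fun s => decide (s < i)) = [] :=
        List.filter_eq_nil_iff.mpr (fun x hx => by have := h.1 x hx; simp; omega)
      have h3 : S.filter (fun s => decide (i ≤ s)) = S :=
        List.filter_eq_self.mpr (fun x hx => by have := h.1 x hx; simp; omega)
      simp [List.filter_cons, ha, hle, h2, h3]

lemma filter_ge_cons (S : List Int) (i : Int) (h : S.Pairwise (· < ·)) (hi : i ∈ S) :
    S.filter (fun s => decide (i ≤ s)) = i :: S.filter (fun s => decide (i < s)) := by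
  induction S with
  | nil => cases hi
  | cons a S ih =>
    rw [List.pairwise_cons] at h
    rcases List.mem_cons.mp hi with rfl | hi'
    · have h1 : S.filter (fun s => decide (i ≤ s)) = S :=
        List.filter_eq_self.mpr (fun x hx => by have := h.1 x hx; simp; omega)
      have h2 : S.filter (fun s => decide (i < s)) = S :=
        List.filter_eq_self.mpr (fun x hx => by have := h.1 x hx; simp; omega)
      simp [List.filter_cons, h1, h2]
    · have hai : a < i := h.1 i hi'
      have hx1 : ¬ (i ≤ a) := by omega
      have hx2 : ¬ (i < a) := by omega
      simp only [List.filter_cons, hx1, hx2, decide_false, cond_false, if_false]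
      exact ih h.2 hi'

lemma filter_le_append (S : List Int) (i : Int) (h : S.Pairwise (· < ·)) (hi : i ∈ S) :
    S.filter (fun s => decide (s ≤ i)) = S.filter (fun s => decide (s < i)) ++ [i] := by
  induction S with
  | nil => cases hi
  | cons a S ih =>
    rw [List.pairwise_cons] at h
    rcases List.mem_cons.mp hi with rfl | hi'
    · have h1 : S.filter (fun s => decide (s ≤ i)) = [] :=
        List.filter_eq_nil_iff.mpr (fun x hx => by have := h.1 x hx; simp; omega)
      have h2 : S.filter (fun s => decide (s < i)) = [] :=
        List.filter_eq_nil_iff.mpr (fun x hx => by have := h.1 x hx; simp; omega)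
      simp [List.filter_cons, h1, h2]
    · have hai : a < i := h.1 i hi'
      have hx1 : a ≤ i := by omega
      simp only [List.filter_cons, hx1, hai, decide_true, cond_true, if_true]
      rw [ih h.2 hi']; rfl

lemma getLast?_of_max (S : List Int) (j : Int) (h : S.Pairwise (· < ·)) (hj : j ∈ S)
    (hmax : ∀ x ∈ S, x ≤ j) : S.getLast? = some j := by
  induction S with
  | nil => cases hj
  | cons a S ih =>
    rw [List.pairwise_cons] at h
    cases S with
    | nil =>
      simp only [List.mem_singleton] at hj
      simp [hj]
    | cons b T =>
      have hj' : j ∈ b :: T := by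
        rcases List.mem_cons.mp hj with rfl | h' 
        · exfalso
          have h1 := h.1 b (by simp)
          have h2 := hmax b (by simp)
          omega
        · exact h'
      rw [List.getLast?_cons_cons]
      exact ih h.2 hj' (fun x hx => hmax x (by simp [hx]))

lemma le_getLast_of_sorted (S : List Int) (y : Int) (h : S.Pairwise (· < ·))
    (hy : S.getLast? = some y) : ∀ x ∈ S, x ≤ y := by
  induction S with
  | nil => intro x hx; cases hx
  | cons a S ih =>
    rw [List.pairwise_cons] at h
    intro x hx
    cases S with
    | nil =>
      simp only [List.mem_singleton] at hx
      simp only [List.getLast?_singleton, Option.some.injEq] at hy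
      omega
    | cons b T =>
      rw [List.getLast?_cons_cons] at hy
      rcases List.mem_cons.mp hx with rfl | hx'
      · have h1 := h.1 b (by simp)
        have h2 := ih h.2 hy b (by simp)
        omega
      · exact ih h.2 hy x hx'

lemma cycNext_mem (S : List Int) (i : Int) (h : S.Pairwise (· < ·)) (hi : i ∈ S) :
    cycNext S i ∈ S := by
  unfold cycNext
  cases hF : S.filter (fun s => decide (i < s)) with
  | cons s r =>
    have hs : s ∈ S := List.mem_of_mem_filter (hF ▸ List.mem_cons_self)
    simpa using hs
  | nil =>
    cases S with
    | nil => cases hi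
    | cons a T => simpa using List.mem_cons_self

lemma cyc_head (S : List Int) (i : Int) (h : S.Pairwise (· < ·)) (hi : i ∈ S) :
    cyc S i = i :: (S.filter (fun s => decide (i < s)) ++ S.filter (fun s => decide (s < i))) := by
  unfold cyc
  rw [filter_ge_cons S i h hi]
  rfl

lemma length_cyc (S : List Int) (i : Int) (h : S.Pairwise (· < ·)) :
    (cyc S i).length = S.length := by
  have hpart := congrArg List.length (filter_partition S i h)
  simp only [List.length_append] at hpart
  simp only [cyc, List.length_append]
  omega

lemma cyc_perm (S : List Int) (i : Int) (h : S.Pairwise (· < ·)) : (cyc S i).Perm S := by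
  unfold cyc
  conv_rhs => rw [filter_partition S i h]
  exact List.perm_append_comm

lemma cyc_cycNext (S : List Int) (i : Int) (h : S.Pairwise (· < ·)) (hi : i ∈ S) :
    cyc S (cycNext S i) = (cyc S i).tail ++ [i] := by
  have htail : (cyc S i).tail = S.filter (fun s => decide (i < s)) ++ S.filter (fun s => decide (s < i)) := by
    rw [cyc_head S i h hi]; rfl
  rw [htail]
  cases hF : S.filter (fun s => decide (i < s)) with
  | cons s r =>
    have hnext : cycNext S i = s := by simp [cycNext, hF]
    have hs : s ∈ S := List.mem_of_mem_filter (hF ▸ List.mem_cons_self)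
    have his : i < s := by
      have := List.of_mem_filter (hF ▸ List.mem_cons_self (a := s) (l := r))
      simpa using this
    have hFpair : (s :: r).Pairwise (· < ·) := hF ▸ List.Pairwise.sublist List.filter_sublist h
    have hrgt : ∀ x ∈ r, s < x := (List.pairwise_cons.mp hFpair).1
    -- (b) filter (s < ·) S = r
    have hb : S.filter (fun x => decide (s < x)) = r := by
      have h1 : S.filter (fun x => decide (s < x)) = (S.filter (fun x => decide (i < x))).filter (fun x => decide (s < x)) := by
        rw [List.filter_filter]
        apply List.filter_congr
        intro x hx
        by_cases hsx : s < x
        · simp [hsx, (show i < x by omega)]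
        · simp [hsx]
      rw [h1, hF, List.filter_cons]
      simp only [lt_irrefl, decide_false, cond_false]
      exact List.filter_eq_self.mpr (fun x hx => by simp [hrgt x hx])
    -- (c) filter (· < s) S = filter (· < i) S ++ [i]
    have hc : S.filter (fun x => decide (x < s)) = S.filter (fun x => decide (x < i)) ++ [i] := by
      have h1 : S.filter (fun x => decide (x < s)) = S.filter (fun x => decide (x ≤ i)) := by
        apply List.filter_congr
        intro x hx
        by_cases hxi : x ≤ i
        · simp [hxi, (show x < s by omega)]
        · have hix : i < x := by omega
          have : x ∈ s :: r := hF ▸ List.mem_filter.mpr ⟨hx, by simpa using hix⟩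
          rcases List.mem_cons.mp this with rfl | hxr
          · simp [hxi]
          · have := hrgt x hxr
            simp [hxi, (show ¬ x < s by omega)]
      rw [h1]
      exact filter_le_append S i h hi
    rw [hnext]
    unfold cyc
    rw [filter_ge_cons S s h hs, hb, hc]
    simp
  | nil =>
    have hmax : ∀ x ∈ S, x ≤ i := by
      intro x hx
      by_contra hgt
      have : x ∈ S.filter (fun s => decide (i < s)) := List.mem_filter.mpr ⟨hx, by simpa using by omega⟩
      rw [hF] at this; cases this
    cases hSc : S with
    | nil => rw [hSc] at hi; cases hi
    | cons a T =>
      subst hSc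
      have hnext : cycNext (a :: T) i = a := by
        unfold cycNext
        rw [hF]
        rfl
      have hamin : ∀ x ∈ (a :: T), a ≤ x := by
        intro x hx
        rcases List.mem_cons.mp hx with rfl | hxT
        · omega
        · have := (List.pairwise_cons.mp h).1 x hxT; omega
      have hga : (a :: T).filter (fun s => decide (a ≤ s)) = a :: T :=
        List.filter_eq_self.mpr (fun x hx => by simpa using hamin x hx)
      have hla : (a :: T).filter (fun s => decide (s < a)) = [] :=
        List.filter_eq_nil_iff.mpr (fun x hx => by have := hamin x hx; simp; omega)
      have hli : (a :: T).filter (fun s => decide (s ≤ i)) = a :: T :=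
        List.filter_eq_self.mpr (fun x hx => by simpa using hmax x hx)
      rw [hnext]
      unfold cyc
      rw [hga, hla]
      have hfin : (a :: T).filter (fun x => decide (x < i)) ++ [i] = a :: T := by
        rw [← filter_le_append (a :: T) i h hi, hli]
      simpa using hfin.symm

lemma cycNext_erase (S : List Int) (i j : Int) (h : S.Pairwise (· < ·))
    (hi : i ∈ S) (hj : j ∈ S) (hne : j ≠ i) :
    cycNext (S.erase i) j = if j = cycPrev S i then cycNext S i else cycNext S j := by
  have hnd : S.Nodup := h.imp (fun hab => LT.lt.ne hab)
  have hEr : S.erase i = S.filter (fun x => x != i) := hnd.erase_eq_filter i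
  have hcomm : ∀ (p : Int → Bool), (S.erase i).filter p = (S.filter p).filter (fun x => x != i) := by
    intro p
    rw [hEr, List.filter_filter, List.filter_filter]
    exact List.filter_congr (fun x _ => by rw [Bool.and_comm])
  cases hF : S.filter (fun s => decide (j < s)) with
  | cons s r =>
    have hs : s ∈ S := List.mem_of_mem_filter (hF ▸ List.mem_cons_self)
    have hjs : j < s := by
      have := List.of_mem_filter (hF ▸ List.mem_cons_self (a := s) (l := r))
      simpa using this
    have hFpair : (s :: r).Pairwise (· < ·) := hF ▸ List.Pairwise.sublist List.filter_sublist h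
    have hrgt : ∀ x ∈ r, s < x := (List.pairwise_cons.mp hFpair).1
    by_cases hsi : s = i
    · subst hsi
      have hjmem : j ∈ S.filter (fun x => decide (x < s)) :=
        List.mem_filter.mpr ⟨hj, by simp only [decide_eq_true_eq]; omega⟩
      have hmaxf : ∀ x ∈ S.filter (fun x => decide (x < s)), x ≤ j := by
        intro x hx
        have hxS := List.mem_of_mem_filter hx
        have hxi : x < s := by simpa using List.of_mem_filter hx
        by_contra hgt
        have : x ∈ S.filter (fun y => decide (j < y)) :=
          List.mem_filter.mpr ⟨hxS, by simp only [decide_eq_true_eq]; omega⟩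
        rw [hF] at this
        rcases List.mem_cons.mp this with rfl | hxr
        · omega
        · have := hrgt x hxr; omega
      have hprev : cycPrev S s = j := by
        unfold cycPrev
        rw [getLast?_of_max _ j (List.Pairwise.sublist List.filter_sublist h) hjmem hmaxf]
        rfl
      rw [hprev, if_pos rfl]
      have h1 : (S.erase s).filter (fun x => decide (j < x)) = r := by
        rw [hcomm, hF, List.filter_cons]
        simp only [bne_self_eq_false, cond_false]
        exact List.filter_eq_self.mpr (fun x hx => by have := hrgt x hx; simp [bne]; omega)
      have h2 : S.filter (fun x => decide (s < x)) = r := by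
        have e1 : S.filter (fun x => decide (s < x)) = (S.filter (fun x => decide (j < x))).filter (fun x => decide (s < x)) := by
          rw [List.filter_filter]
          exact (List.filter_congr (fun x _ => by
            by_cases hix : s < x
            · simp [hix, (show j < x by omega)]
            · simp [hix])).symm
        rw [e1, hF, List.filter_cons]
        simp only [lt_irrefl, decide_false, cond_false]
        exact List.filter_eq_self.mpr (fun x hx => by have := hrgt x hx; simp; omega)
      unfold cycNext
      rw [h1, h2]
      cases r with
      | cons s' r' => rfl
      | nil =>
        cases hS : S with
        | nil => rw [hS] at hj; cases hj
        | cons a T =>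
          subst hS
          have haj : a ≤ j := by
            rcases List.mem_cons.mp hj with rfl | hjT
            · omega
            · have := (List.pairwise_cons.mp h).1 j hjT; omega
          rw [List.erase_cons_tail (by simp; omega)]
          rfl
    · have hcond : j ≠ cycPrev S i := by
        intro hJP
        cases hG : S.filter (fun x => decide (x < i)) with
        | nil =>
          have hSne : S ≠ [] := by intro hS0; rw [hS0] at hj; cases hj
          obtain ⟨y, hy⟩ := Option.isSome_iff_exists.mp (List.getLast?_isSome.mpr hSne)
          have hPy : cycPrev S i = y := by unfold cycPrev; rw [hG, hy]; rfl
          have hsy : s ≤ y := le_getLast_of_sorted S y h hy s hs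
          rw [hPy] at hJP
          omega
        | cons w ws =>
          obtain ⟨z, hz⟩ := Option.isSome_iff_exists.mp (List.getLast?_isSome.mpr (by simp : (w :: ws) ≠ []))
          have hPz : cycPrev S i = z := by unfold cycPrev; rw [hG, hz]; rfl
          have hzmem : z ∈ S.filter (fun x => decide (x < i)) := hG ▸ List.mem_of_getLast? hz
          have hzi : z < i := by simpa using List.of_mem_filter hzmem
          rw [hPz] at hJP
          subst hJP
          -- now z < i, so i is in the successor list s :: r, hence s < i (s ≠ i)
          have hiF : i ∈ s :: r := hF ▸ List.mem_filter.mpr ⟨hi, by simp only [decide_eq_true_eq]; omega⟩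
          have hsil : s < i := by
            rcases List.mem_cons.mp hiF with rfl | hir
            · exact absurd rfl hsi
            · exact hrgt i hir
          have hsmem : s ∈ S.filter (fun x => decide (x < i)) :=
            List.mem_filter.mpr ⟨hs, by simp only [decide_eq_true_eq]; omega⟩
          have : s ≤ j :=
            le_getLast_of_sorted _ j (List.Pairwise.sublist List.filter_sublist h) (hG ▸ hz) s hsmem
          omega
      rw [if_neg hcond]
      have h1 : (S.erase i).filter (fun x => decide (j < x)) = s :: r.filter (fun x => x != i) := by
        rw [hcomm, hF, List.filter_cons]
        simp [bne, hsi]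
      unfold cycNext
      rw [h1, hF]
      rfl
  | nil =>
    have hmax : ∀ x ∈ S, ¬ j < x := by
      intro x hx hgt
      have : x ∈ S.filter (fun s => decide (j < s)) :=
        List.mem_filter.mpr ⟨hx, by simp only [decide_eq_true_eq]; omega⟩
      rw [hF] at this; cases this
    have h1 : (S.erase i).filter (fun s => decide (j < s)) = [] := by rw [hcomm, hF]; rfl
    cases hS : S with
    | nil => rw [hS] at hj; cases hj
    | cons a T =>
      subst hS
      have hTgt : ∀ x ∈ T, a < x := (List.pairwise_cons.mp h).1
      by_cases hai : a = i
      · subst hai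
        have hjmax : ∀ x ∈ a :: T, x ≤ j := fun x hx => by have := hmax x hx; omega
        have hGnil : (a :: T).filter (fun x => decide (x < a)) = [] := by
          apply List.filter_eq_nil_iff.mpr
          intro x hx
          rcases List.mem_cons.mp hx with rfl | hxT
          · simp
          · have := hTgt x hxT; simp; omega
        have hprev : cycPrev (a :: T) a = j := by
          unfold cycPrev
          rw [hGnil, getLast?_of_max _ j h hj hjmax]
          rfl
        rw [hprev, if_pos rfl]
        have hnT : (a :: T).filter (fun x => decide (a < x)) = T :=
          by rw [List.filter_cons]
             simp only [lt_irrefl, decide_false, cond_false]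
             exact List.filter_eq_self.mpr (fun x hx => by have := hTgt x hx; simp; omega)
        unfold cycNext
        rw [List.erase_cons_head, hnT]
        have h1' : T.filter (fun s => decide (j < s)) = [] := by
          apply List.filter_eq_nil_iff.mpr
          intro x hx
          have := hmax x (by simp [hx]); simp; omega
        rw [h1']
        cases T with
        | nil =>
          exfalso
          rcases List.mem_cons.mp hj with rfl | hjT
          · exact hne rfl
          · cases hjT
        | cons b T' => rfl
      · have hiT : i ∈ T := by
          rcases List.mem_cons.mp hi with rfl | hiT
          · exact absurd rfl hai
          · exact hiT
        have hail : a < i := hTgt i hiT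
        have hGcons : a ∈ (a :: T).filter (fun x => decide (x < i)) :=
          List.mem_filter.mpr ⟨List.mem_cons_self, by simp only [decide_eq_true_eq]; omega⟩
        have hGne : (a :: T).filter (fun x => decide (x < i)) ≠ [] := by
          intro h0; rw [h0] at hGcons; cases hGcons
        obtain ⟨z, hz⟩ := Option.isSome_iff_exists.mp (List.getLast?_isSome.mpr hGne)
        have hzi : z < i := by simpa using List.of_mem_filter (List.mem_of_getLast? hz)
        have hij : i ≤ j := by have := hmax i hi; omega
        have hprevz : cycPrev (a :: T) i = z := by unfold cycPrev; rw [hz]; rfl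
        have hcond : j ≠ cycPrev (a :: T) i := by rw [hprevz]; omega
        rw [if_neg hcond]
        unfold cycNext
        rw [h1, hF, List.erase_cons_tail (by simp [hai])]
        rfl

lemma headD_append_left (l m : List Int) (d : Int) (h : l ≠ []) :
    (l ++ m).headD d = l.headD d := by
  cases l with
  | nil => exact absurd rfl h
  | cons a t => rfl

lemma headD_rev_map_neg (l : List Int) (d : Int) :
    ((l.map (fun x => -x)).reverse).headD d = (l.getLast?.map (fun x : Int => -x)).getD d := by
  induction l with
  | nil => rfl
  | cons a t ih =>
    cases ht : t with
    | nil => simp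
    | cons b t' =>
      rw [← ht]
      have hne : (t.map (fun x : Int => -x)).reverse ≠ [] := by simp [ht]
      have h1 : ((a :: t).map (fun x => -x)).reverse = (t.map (fun x : Int => -x)).reverse ++ [-a] := by
        simp
      rw [h1, headD_append_left _ _ _ hne, ih, ht, List.getLast?_cons_cons]

lemma pairwise_neg_rev (S : List Int) (h : S.Pairwise (· < ·)) :
    ((S.map (fun x => -x)).reverse).Pairwise (· < ·) := by
  rw [List.pairwise_reverse, List.pairwise_map]
  exact h.imp (fun hab => by omega)

lemma cycPrev_eq (S : List Int) (j : Int) :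
    cycPrev S j = -(cycNext ((S.map (fun x => -x)).reverse) (-j)) := by
  unfold cycPrev cycNext
  rw [List.filter_reverse, List.filter_map]
  have hcomp : ((fun s => decide (-j < s)) ∘ (fun x : Int => -x)) = fun x => decide (x < j) := by
    funext x
    show decide (-j < -x) = decide (x < j)
    exact decide_eq_decide.mpr neg_lt_neg_iff
  rw [hcomp, headD_rev_map_neg, headD_rev_map_neg]
  cases (S.filter (fun x => decide (x < j))).getLast? with
  | some a => simp
  | none =>
    cases S.getLast? with
    | some b => simp
    | none => simp

lemma cycPrev_mem (S : List Int) (i : Int) (h : S.Pairwise (· < ·)) (hi : i ∈ S) :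
    cycPrev S i ∈ S := by
  rw [cycPrev_eq]
  have hmemT : -i ∈ (S.map (fun x => -x)).reverse := by
    simp only [List.mem_reverse, List.mem_map]
    exact ⟨i, hi, rfl⟩
  have hmem := cycNext_mem _ (-i) (pairwise_neg_rev S h) hmemT
  simp only [List.mem_reverse, List.mem_map] at hmem
  obtain ⟨x, hx, hxe⟩ := hmem
  rw [← hxe, neg_neg]
  exact hx

lemma cycPrev_erase (S : List Int) (i j : Int) (h : S.Pairwise (· < ·))
    (hi : i ∈ S) (hj : j ∈ S) (hne : j ≠ i) :
    cycPrev (S.erase i) j = if j = cycNext S i then cycPrev S i else cycPrev S j := by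
  have hnd : S.Nodup := h.imp (fun hab => LT.lt.ne hab)
  have hT : ((S.map (fun x => -x)).reverse).Pairwise (· < ·) := pairwise_neg_rev S h
  have hndT : ((S.map (fun x => -x)).reverse).Nodup := hT.imp (fun hab => LT.lt.ne hab)
  have hmap : ((S.erase i).map (fun x => -x)).reverse = ((S.map (fun x => -x)).reverse).erase (-i) := by
    rw [hnd.erase_eq_filter i, hndT.erase_eq_filter (-i), List.filter_reverse, List.filter_map]
    have hcomp : ((fun x => x != -i) ∘ (fun x : Int => -x)) = fun x : Int => x != i := by
      funext x
      show (-x != -i) = (x != i)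
      simp [bne]
    rw [hcomp]
  have hTS : (((S.map (fun x => -x)).reverse).map (fun x => -x)).reverse = S := by
    rw [List.map_reverse, List.reverse_reverse, List.map_map]
    have : ((fun x : Int => -x) ∘ (fun x : Int => -x)) = id := by funext x; simp
    rw [this, List.map_id]
  have hPT : cycPrev ((S.map (fun x => -x)).reverse) (-i) = -(cycNext S i) := by
    rw [cycPrev_eq _ (-i), hTS, neg_neg]
  have hmemi : -i ∈ (S.map (fun x => -x)).reverse := by
    simp only [List.mem_reverse, List.mem_map]; exact ⟨i, hi, rfl⟩
  have hmemj : -j ∈ (S.map (fun x => -x)).reverse := by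
    simp only [List.mem_reverse, List.mem_map]; exact ⟨j, hj, rfl⟩
  rw [cycPrev_eq (S.erase i) j, hmap,
    cycNext_erase _ (-i) (-j) hT hmemi hmemj (by omega), hPT]
  by_cases hc : j = cycNext S i
  · rw [if_pos (by omega), if_pos hc, ← cycPrev_eq]
  · rw [if_neg (by omega), if_neg hc, ← cycPrev_eq]

lemma pyGetD_pySetD' (xs : List Int) (p j v : Int) (hp0 : 0 ≤ p) (hp : p < (xs.length : Int))
    (hj0 : 0 ≤ j) (hj : j < (xs.length : Int)) :
    PySem.List.pyGetD (PySem.List.pySetD xs p v) j 0 = if j = p then v else PySem.List.pyGetD xs j 0 := by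
  rw [PySem.List.pySetD_of_nonneg xs v hp0,
    PySem.List.pyGetD_eq_getElem _ _ hj0 (by simpa using hj),
    PySem.List.pyGetD_eq_getElem _ _ hj0 hj,
    List.getElem_set]
  have : p.toNat = j.toNat ↔ j = p := by omega
  split_ifs with h1 h2 h2
  · rfl
  · exact absurd (this.mp h1) h2
  · exact absurd (this.mpr h2) h1
  · rfl

lemma collect_eq (S a0 : List Int) (hS : S.Pairwise (· < ·))
    (h0 : ∀ j ∈ S, PySem.List.pyGetD a0 j 0 = cycNext S j) :
    ∀ (m : Nat) (i : Int), i ∈ S → m ≤ S.length → pvCollect a0 m i = (cyc S i).take m := by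
  intro m
  induction m with
  | zero => intro i hi hm; simp [pvCollect]
  | succ m ih =>
    intro i hi hm
    have hnext := cycNext_mem S i hS hi
    have hlc := length_cyc S i hS
    rw [pvCollect, h0 i hi, ih (cycNext S i) hnext (by omega), cyc_cycNext S i hS hi]
    have hlen2 : ((cyc S i).tail).length = S.length - 1 := by rw [List.length_tail, hlc]
    rw [List.take_append_of_le_length (by omega)]
    conv_rhs => rw [cyc_head S i hS hi]
    rw [List.take_succ_cons]
    congr 1
    have : (cyc S i).tail = S.filter (fun s => decide (i < s)) ++ S.filter (fun s => decide (s < i)) := by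
      rw [cyc_head S i hS hi]; rfl
    rw [this]

lemma loop_eq (rest : List (Int × Int)) (k t cnt : Int) (a0 a1 : List Int) (S : List Int)
    (hcnt : cnt = (rest.length : Int))
    (hS : S.Pairwise (· < ·))
    (hmem : ∀ x, x ∈ S ↔ x ∈ rest.map Prod.fst)
    (hnodup : (rest.map Prod.fst).Nodup)
    (hbound : ∀ j ∈ S, 0 ≤ j ∧ j < (a0.length : Int) ∧ j < (a1.length : Int))
    (h0 : ∀ j ∈ S, PySem.List.pyGetD a0 j 0 = cycNext S j)
    (h1 : ∀ j ∈ S, PySem.List.pyGetD a1 j 0 = cycPrev S j) :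
    pvLoopA rest k t cnt a0 a1 = pvScan rest k t := by
  induction rest generalizing k t cnt a0 a1 S with
  | nil => rfl
  | cons hd rest ih =>
    obtain ⟨i, v0⟩ := hd
    have hiS : i ∈ S := (hmem i).mpr (by simp)
    have hnd : S.Nodup := hS.imp (fun hab => LT.lt.ne hab)
    have hperm : S.Perm (((i, v0) :: rest).map Prod.fst) :=
      (List.perm_ext_iff_of_nodup hnd hnodup).mpr hmem
    have hlenS : S.length = rest.length + 1 := by simpa using hperm.length_eq
    obtain ⟨hi0, hia0, hia1⟩ := hbound i hiS
    simp only [pvLoopA, pvScan]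
    rw [← hcnt]
    simp only [List.length_cons] at hcnt
    have hnodup' : (i :: List.map Prod.fst rest).Nodup := hnodup
    by_cases hcond : (v0 - t) * cnt ≤ k
    · rw [if_pos hcond, if_pos hcond]
      rw [h0 i hiS, h1 i hiS]
      have hpm : cycPrev S i ∈ S := cycPrev_mem S i hS hiS
      have hnm : cycNext S i ∈ S := cycNext_mem S i hS hiS
      obtain ⟨hp0, hpa0, _⟩ := hbound _ hpm
      obtain ⟨hn0, _, hna1⟩ := hbound _ hnm
      have hre : PySem.List.pyGetD (PySem.List.pySetD a0 (cycPrev S i) (cycNext S i)) i 0 = cycNext S i := by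
        rw [pyGetD_pySetD' a0 _ i _ hp0 hpa0 hi0 hia0]
        split_ifs with hc
        · rfl
        · exact h0 i hiS
      rw [hre]
      have harith : t + (v0 - t) = v0 := by ring
      rw [harith]
      apply ih (S := S.erase i)
      · omega
      · exact List.Pairwise.sublist List.erase_sublist hS
      · intro x
        rw [hnd.mem_erase_iff]
        have h2 : x ∈ S ↔ x ∈ i :: List.map Prod.fst rest := hmem x
        have hni : i ∉ rest.map Prod.fst := (List.nodup_cons.mp hnodup').1
        simp only [List.mem_cons] at h2
        constructor
        · rintro ⟨hxne, hxS⟩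
          rcases h2.mp hxS with rfl | hx
          · exact absurd rfl hxne
          · exact hx
        · intro hx
          refine ⟨?_, h2.mpr (Or.inr hx)⟩
          rintro rfl
          exact hni hx
      · exact (List.nodup_cons.mp hnodup').2
      · intro j hj
        have hjS := List.mem_of_mem_erase hj
        obtain ⟨hj0, hja0, hja1⟩ := hbound j hjS
        simp only [PySem.List.length_pySetD]
        exact ⟨hj0, hja0, hja1⟩
      · intro j hj
        have hjS := List.mem_of_mem_erase hj
        have hjne : j ≠ i := ((hnd.mem_erase_iff).mp hj).1
        rw [pyGetD_pySetD' a0 _ j _ hp0 hpa0 (hbound j hjS).1 (hbound j hjS).2.1,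
          cycNext_erase S i j hS hiS hjS hjne]
        split_ifs with hc
        · rfl
        · exact h0 j hjS
      · intro j hj
        have hjS := List.mem_of_mem_erase hj
        have hjne : j ≠ i := ((hnd.mem_erase_iff).mp hj).1
        rw [pyGetD_pySetD' a1 _ j _ hn0 hna1 (hbound j hjS).1 (hbound j hjS).2.2,
          cycPrev_erase S i j hS hiS hjS hjne]
        split_ifs with hc
        · rfl
        · exact h1 j hjS
    · rw [if_neg hcond, if_neg hcond]
      have hcnt' : cnt.toNat = S.length := by omega
      rw [hcnt', collect_eq S a0 hS h0 S.length i hiS le_rfl,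
        List.take_of_length_le (by rw [length_cyc S i hS])]
      have hs1 : PySem.List.sorted (cyc S i) (fun x => x) false = S :=
        PySem.List.sorted_eq_of_perm_of_pairwise_lt _ S _ (cyc_perm S i hS).symm hS
      have hs2 : PySem.List.sorted (((i, v0) :: rest).map Prod.fst) (fun x => x) false = S :=
        PySem.List.sorted_eq_of_perm_of_pairwise_lt _ S _ hperm hS
      rw [hs1, hs2]

lemma pySet?_neg_one_concat (xs : List Int) (x v : Int) :
    PySem.List.pySet? (xs ++ [x]) (-1) v = some (xs ++ [v]) := by
  unfold PySem.List.pySet? PySem.List.pyIdx?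
  have hlen : (xs ++ [x]).length = xs.length + 1 := by simp
  rw [hlen]
  have h1 : ¬ ((0:Int) ≤ -1) := by omega
  have h2 : -((xs.length + 1 : Nat) : Int) ≤ -1 := by push_cast; omega
  rw [if_neg h1, if_pos h2]
  have h3 : xs.length + 1 - (-(-1:Int)).toNat = xs.length := by norm_num
  rw [h3]
  simp only [Option.map_some]
  congr 1
  rw [List.set_append_right _ _ le_rfl]
  simp

lemma pySet?_zero_cons (a : Int) (xs : List Int) (v : Int) :
    PySem.List.pySet? (a :: xs) 0 v = some (v :: xs) := by
  unfold PySem.List.pySet? PySem.List.pyIdx?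
  norm_num

lemma init_next (m : Nat) (hm : 1 ≤ m) (j : Int) (hj : j ∈ PySem.List.pyRange 0 (m : Int)) :
    PySem.List.pyGetD (PySem.List.pyRange 1 (m : Int) ++ [0]) j 0
      = cycNext (PySem.List.pyRange 0 (m : Int)) j := by
  obtain ⟨hj0, hjm⟩ := PySem.List.mem_pyRange_one.mp hj
  have hfilt : (PySem.List.pyRange 0 (m:Int)).filter (fun s => decide (j < s))
      = PySem.List.pyRange (j+1) (m:Int) := by
    rw [PySem.List.pyRange_one_append 0 (j+1) (m:Int) (by omega) (by omega), List.filter_append]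
    have h1 : (PySem.List.pyRange 0 (j+1)).filter (fun s => decide (j < s)) = [] :=
      List.filter_eq_nil_iff.mpr (fun x hx => by
        have := PySem.List.mem_pyRange_one.mp hx; simp; omega)
    have h2 : (PySem.List.pyRange (j+1) (m:Int)).filter (fun s => decide (j < s))
        = PySem.List.pyRange (j+1) (m:Int) :=
      List.filter_eq_self.mpr (fun x hx => by
        have := PySem.List.mem_pyRange_one.mp hx; simp; omega)
    rw [h1, h2]
    rfl
  unfold cycNext
  rw [hfilt]
  have hlen1 : (PySem.List.pyRange 1 (m:Int)).length = m - 1 := by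
    rw [PySem.List.length_pyRange_one]; omega
  by_cases hjl : j + 1 < (m:Int)
  · have hL : PySem.List.pyGetD (PySem.List.pyRange 1 (m:Int) ++ [0]) j 0 = j + 1 := by
      rw [PySem.List.pyGetD_eq_getElem _ _ hj0
        (by rw [List.length_append, hlen1]; push_cast; omega)]
      rw [List.getElem_append_left (by rw [hlen1]; omega)]
      rw [PySem.List.getElem_pyRange_one]
      omega
    rw [hL, PySem.List.pyRange_one_cons hjl]
    rfl
  · have hpre : ((PySem.List.pyRange 1 (m:Int)).length : Int) = j := by
      rw [PySem.List.length_pyRange_one]; omega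
    have hL : PySem.List.pyGetD (PySem.List.pyRange 1 (m:Int) ++ [0]) j 0 = 0 := by
      unfold PySem.List.pyGetD
      rw [← hpre, PySem.List.pyGet?_append_length]
      rfl
    rw [hL, PySem.List.pyRange_one_eq_nil (a := j + 1) (b := (m:Int)) (by omega)]
    rw [PySem.List.pyRange_one_cons (a := 0) (b := (m:Int)) (by omega)]
    rfl

lemma init_prev (m : Nat) (hm : 1 ≤ m) (j : Int) (hj : j ∈ PySem.List.pyRange 0 (m : Int)) :
    PySem.List.pyGetD (((m:Int) - 1) :: PySem.List.pyRange 0 ((m : Int) - 1)) j 0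
      = cycPrev (PySem.List.pyRange 0 (m : Int)) j := by
  obtain ⟨hj0, hjm⟩ := PySem.List.mem_pyRange_one.mp hj
  have hfilt : (PySem.List.pyRange 0 (m:Int)).filter (fun s => decide (s < j))
      = PySem.List.pyRange 0 j := by
    rw [PySem.List.pyRange_one_append 0 j (m:Int) (by omega) (by omega), List.filter_append]
    have h1 : (PySem.List.pyRange 0 j).filter (fun s => decide (s < j)) = PySem.List.pyRange 0 j :=
      List.filter_eq_self.mpr (fun x hx => by
        have := PySem.List.mem_pyRange_one.mp hx; simp; omega)
    have h2 : (PySem.List.pyRange j (m:Int)).filter (fun s => decide (s < j)) = [] :=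
      List.filter_eq_nil_iff.mpr (fun x hx => by
        have := PySem.List.mem_pyRange_one.mp hx; simp; omega)
    rw [h1, h2]
    simp
  unfold cycPrev
  rw [hfilt]
  by_cases hj1 : 0 < j
  · have hsplit : PySem.List.pyRange 0 j = PySem.List.pyRange 0 (j-1) ++ [j-1] := by
      have h' := PySem.List.pyRange_one_succ_right (a := 0) (b := j - 1) (by omega)
      rw [show j - 1 + 1 = j by ring] at h'
      exact h'
    rw [hsplit, List.getLast?_concat]
    have hjn : j = ((j - 1).toNat : Int) + 1 := by omega
    unfold PySem.List.pyGetD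
    rw [hjn, PySem.List.pyGet?_cons_succ, PySem.List.pyGet?_natCast]
    rw [List.getElem?_eq_getElem (by rw [PySem.List.length_pyRange_one]; omega)]
    rw [PySem.List.getElem_pyRange_one]
    simp only [Option.getD_some]
    omega
  · have hj0' : j = 0 := by omega
    subst hj0'
    rw [show PySem.List.pyRange (0:Int) 0 = [] from PySem.List.pyRange_one_eq_nil le_rfl]
    have hsplit : PySem.List.pyRange 0 (m:Int)
        = PySem.List.pyRange 0 ((m:Int)-1) ++ [(m:Int)-1] := by
      have h' := PySem.List.pyRange_one_succ_right (a := 0) (b := (m:Int) - 1) (by omega)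
      rw [show (m:Int) - 1 + 1 = (m:Int) by ring] at h'
      exact h'
    rw [hsplit, List.getLast?_concat]
    rw [PySem.List.pyGetD_zero_cons]
    rfl

-- ===== B-side lemmas =====

lemma pvCost_mono (ft : List Int) {q q' : Int} (h : q ≤ q') : pvCost ft q ≤ pvCost ft q' := by
  induction ft with
  | nil => simp [pvCost]
  | cons a l ih =>
    simp only [pvCost, List.map_cons, List.sum_cons] at *
    have : min a q ≤ min a q' := by omega
    omega

lemma pvCost_const (ft : List Int) (q : Int) (h : ∀ x ∈ ft, q ≤ x) :
    pvCost ft q = q * ft.length := by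
  induction ft with
  | nil => simp [pvCost]
  | cons a l ih =>
    have ha := h a (by simp)
    simp only [pvCost, List.map_cons, List.sum_cons, List.length_cons] at *
    rw [ih (fun x hx => h x (by simp [hx]))]
    have : min a q = q := by omega
    push_cast
    rw [this]; ring

lemma pvCost_sum (ft : List Int) (q : Int) (h : ∀ x ∈ ft, x ≤ q) :
    pvCost ft q = ft.sum := by
  induction ft with
  | nil => simp [pvCost]
  | cons a l ih =>
    have ha := h a (by simp)
    simp only [pvCost, List.map_cons, List.sum_cons] at *
    rw [ih (fun x hx => h x (by simp [hx]))]
    have : min a q = a := by omega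
    omega

lemma pvCost_perm (l l' : List Int) (q : Int) (h : l.Perm l') : pvCost l q = pvCost l' q :=
  (h.map (fun f => min f q)).sum_eq

-- the binary search lands on the unique p with cost(p) ≤ k < cost(p+1)
lemma pvBS_good (ft : List Int) (k lo hi : Int) (hlh : lo ≤ hi)
    (hlo : pvCost ft lo ≤ k) (hhi : k < pvCost ft (hi + 1)) :
    pvCost ft (pvBS ft k lo hi) ≤ k ∧ k < pvCost ft (pvBS ft k lo hi + 1) := by
  fun_induction pvBS ft k lo hi with
  | case1 lo hi h mid hc ih =>
    have hm := pvBS_mid lo hi h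
    exact ih (by omega) hc hhi
  | case2 lo hi h mid hc ih =>
    have hm := pvBS_mid lo hi h
    have : (mid - 1) + 1 = mid := by ring
    exact ih (by omega) hlo (by rw [this]; omega)
  | case3 lo hi h =>
    have : lo = hi := by omega
    subst this
    exact ⟨hlo, hhi⟩

-- the scan returns the survivors-above-p formula, for ANY p with costL(p) ≤ k < costL(p+1)
lemma scan_formula (L : List (Int × Int)) (k t p : Int)
    (hsort : L.Pairwise (fun a b => a.2 ≤ b.2))
    (htot : k < (L.map Prod.snd).sum - t * L.length)
    (hle : pvCost (L.map Prod.snd) p - t * L.length ≤ k)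
    (hgt : k < pvCost (L.map Prod.snd) (p + 1) - t * L.length) :
    pvScan L k t
      = PySem.List.pyGetD
          (PySem.List.sorted ((L.filter (fun x => decide (p < x.2))).map Prod.fst) (fun x => x) false)
          (k - (pvCost (L.map Prod.snd) p - t * L.length)) 0 + 1 := by
  induction L generalizing k t with
  | nil =>
    exfalso
    simp [pvCost] at htot hle
    omega
  | cons hd rest ih =>
    obtain ⟨i, v⟩ := hd
    have hrv : ∀ x ∈ rest, v ≤ x.2 := fun x hx => (List.pairwise_cons.mp hsort).1 x hx
    have hrvs : ∀ y ∈ rest.map Prod.snd, v ≤ y := by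
      intro y hy
      obtain ⟨x, hx, rfl⟩ := List.mem_map.mp hy
      exact hrv x hx
    set ℓr : Int := (rest.length : Int) with hℓr
    have hlen : (((i, v) :: rest).length : Int) = ℓr + 1 := by simp [hℓr]
    have hcostv : pvCost (((i, v) :: rest).map Prod.snd) v = v * (ℓr + 1) := by
      rw [show ((i, v) :: rest).map Prod.snd = v :: rest.map Prod.snd from rfl]
      rw [pvCost_const _ v (by intro x hx; rcases List.mem_cons.mp hx with rfl | hx; omega; exact hrvs x hx)]
      simp [hℓr]
    simp only [pvScan]
    rw [hlen]
    by_cases hcond : (v - t) * (ℓr + 1) ≤ k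
    · rw [if_pos hcond]
      -- p ≥ v, else costL(p+1) ≤ costL(v) ≤ k
      have hvp : v ≤ p := by
        by_contra hvp
        have hmono := pvCost_mono (((i, v) :: rest).map Prod.snd) (show p + 1 ≤ v by omega)
        have : pvCost (((i, v) :: rest).map Prod.snd) (p+1) ≤ v * (ℓr + 1) := hcostv ▸ hmono
        simp only [hlen] at hgt
        nlinarith
      -- shift identity: for v ≤ q, cost over the cons = cost over rest + v
      have hshift : ∀ q, v ≤ q →
          pvCost (((i, v) :: rest).map Prod.snd) q = pvCost (rest.map Prod.snd) q + v := by
        intro q hq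
        rw [show ((i, v) :: rest).map Prod.snd = v :: rest.map Prod.snd from rfl]
        simp only [pvCost, List.map_cons, List.sum_cons]
        have : min v q = v := by omega
        omega
      have hfilter : ((i, v) :: rest).filter (fun x => decide (p < x.2))
          = rest.filter (fun x => decide (p < x.2)) := by
        rw [List.filter_cons]
        simp [show ¬ (p < v) by omega]
      rw [hfilter]
      rw [ih (k - (v - t) * (ℓr + 1)) v (List.pairwise_cons.mp hsort).2 ?_ ?_ ?_]
      · congr 1
        have e1 := hshift p hvp
        simp only [hlen] at *
        have : pvCost (List.map Prod.snd rest) p - v * ℓr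
            = pvCost (((i, v) :: rest).map Prod.snd) p - v - v * ℓr := by omega
        rw [this]; ring_nf
      · simp only [List.map_cons, List.sum_cons] at htot ⊢
        simp only [hlen] at htot
        nlinarith [htot]
      · have e1 := hshift p hvp
        simp only [hlen] at hle
        nlinarith [hle]
      · have e2 := hshift (p+1) (by omega)
        simp only [hlen] at hgt
        nlinarith [hgt]
    · rw [if_neg hcond]
      -- here p < v and costL is linear below v
      have hpv : p < v := by
        by_contra hpv
        have hmono := pvCost_mono (((i, v) :: rest).map Prod.snd) (show v ≤ p by omega)
        have := hcostv ▸ hmono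
        simp only [hlen] at hle
        nlinarith
      have hcost_low : ∀ q, q ≤ v → pvCost (((i, v) :: rest).map Prod.snd) q = q * (ℓr + 1) := by
        intro q hq
        rw [pvCost_const]
        · simp only [List.length_map, List.length_cons]
          push_cast
          rw [← hℓr]
        · intro x hx
          simp only [List.map_cons, List.mem_cons] at hx
          rcases hx with rfl | hx
          · omega
          · have := hrvs x hx; omega
      have hcp := hcost_low p (by omega)
      have hcp1 := hcost_low (p+1) (by omega)
      -- 0 ≤ k - (p-t)(ℓr+1) < ℓr+1, so k mod (ℓr+1) = k - costL(p)
      simp only [hlen] at hle hgt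
      have hb1 : (p - t) * (ℓr + 1) ≤ k := by
        rw [hcp] at hle
        have e : (p - t) * (ℓr + 1) = p * (ℓr + 1) - t * (ℓr + 1) := by ring
        linarith
      have hb2 : k < (p - t) * (ℓr + 1) + (ℓr + 1) := by
        rw [hcp1] at hgt
        have e : (p - t) * (ℓr + 1) + (ℓr + 1) = (p + 1) * (ℓr + 1) - t * (ℓr + 1) := by ring
        linarith
      have hpos : (0:Int) < ℓr + 1 := by positivity
      have hmod : PySem.Int.mod k (ℓr + 1) = k - ((p - t) * (ℓr + 1)) := by
        rw [PySem.Int.mod_eq_emod_of_pos hpos]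
        have hk : k = (k - (p - t) * (ℓr + 1)) + (ℓr + 1) * (p - t) := by ring
        rw [hk, Int.add_mul_emod_self_left, Int.emod_eq_of_lt (by omega) (by omega)]
        ring
      have hall : ((i, v) :: rest).filter (fun x => decide (p < x.2)) = (i, v) :: rest := by
        apply List.filter_eq_self.mpr
        intro x hx
        rcases List.mem_cons.mp hx with rfl | hx
        · simpa using hpv
        · have := hrv x hx; simp; omega
      rw [hall, hmod, hcp]
      congr 2
      ring

-- ===== VERDICT (by name: the statement is the Claim_ definition above) =====
theorem solution_spec : Claim_equal_solution := by
  intro ft k _ hpre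
  unfold Spec_solution solution solution_alt
  by_cases hsum : ft.sum ≤ k
  · rw [if_pos hsum, if_pos hsum]
  · rw [if_neg hsum, if_neg hsum]
    have hft : ft ≠ [] := by
      rintro rfl
      simp only [List.sum_nil] at hsum
      exact hsum (hpre rfl)
    have hm : 1 ≤ ft.length := by
      cases ft with
      | nil => exact absurd rfl hft
      | cons a l => simp
    -- ===== reduce A to pvScan (sorted scan) =====
    have hr1 : PySem.List.pyRange 1 ((ft.length : Int) + 1)
        = PySem.List.pyRange 1 (ft.length : Int) ++ [(ft.length : Int)] :=
      PySem.List.pyRange_one_succ_right (by exact_mod_cast hm)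
    have hr2 : PySem.List.pyRange (-1) ((ft.length : Int) - 1)
        = -1 :: PySem.List.pyRange 0 ((ft.length : Int) - 1) := by
      have h' := PySem.List.pyRange_one_cons (a := -1) (b := (ft.length : Int) - 1)
        (by omega)
      simpa using h'
    simp only [hr1, pySet?_neg_one_concat, hr2, pySet?_zero_cons]
    have hplen : (PySem.List.sorted (PySem.List.enumerate ft 0) (fun x => x.2) false).length
        = ft.length := by
      rw [PySem.List.length_sorted, PySem.List.length_enumerate]
    have hfst : ((PySem.List.sorted (PySem.List.enumerate ft 0) (fun x => x.2) false).map Prod.fst).Perm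
        (PySem.List.pyRange 0 (ft.length : Int)) := by
      have hp2 := (PySem.List.sorted_perm (PySem.List.enumerate ft 0) (fun x => x.2) false).map Prod.fst
      have hme : (PySem.List.enumerate ft 0).map Prod.fst = PySem.List.pyRange 0 (ft.length : Int) := by
        have := PySem.List.map_fst_enumerate ft 0
        simpa using this
      rw [hme] at hp2
      exact hp2
    have hA : pvLoopA (PySem.List.sorted (PySem.List.enumerate ft 0) (fun x => x.2) false)
        k 0 (ft.length : Int)
        (PySem.List.pyRange 1 (ft.length : Int) ++ [0])
        (((ft.length : Int) - 1) :: PySem.List.pyRange 0 ((ft.length : Int) - 1))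
        = pvScan (PySem.List.sorted (PySem.List.enumerate ft 0) (fun x => x.2) false) k 0 := by
      apply loop_eq _ _ _ _ _ _ (PySem.List.pyRange 0 (ft.length : Int))
      · rw [hplen]
      · exact PySem.List.pairwise_lt_pyRange_one _ _
      · intro x
        rw [hfst.mem_iff]
      · exact hfst.nodup_iff.mpr (PySem.List.nodup_pyRange_one _ _)
      · intro j hj
        obtain ⟨hj0, hjm⟩ := PySem.List.mem_pyRange_one.mp hj
        have hl1 : (PySem.List.pyRange 1 (ft.length : Int) ++ [(0:Int)]).length
            = (ft.length - 1) + 1 := by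
          simp [PySem.List.length_pyRange_one]
        have hl2 : (((ft.length : Int) - 1) :: PySem.List.pyRange 0 ((ft.length : Int) - 1)).length
            = 1 + (ft.length - 1) := by
          simp [PySem.List.length_pyRange_one]
          omega
        refine ⟨hj0, ?_, ?_⟩
        · rw [hl1]; push_cast; omega
        · rw [hl2]; push_cast; omega
      · intro j hj
        exact init_next ft.length hm j hj
      · intro j hj
        exact init_prev ft.length hm j hj
    rw [hA]
    -- ===== B's binary-search p satisfies cost(p) ≤ k < cost(p+1) =====
    obtain ⟨mn, hmn⟩ : ∃ m, PySem.List.min? ft (fun x => x) = some m := by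
      cases hq : PySem.List.min? ft (fun x => x) with
      | none => exact absurd ((PySem.List.min?_eq_none_iff ft (fun x => x)).mp hq) hft
      | some m => exact ⟨m, rfl⟩
    obtain ⟨mx, hmx⟩ : ∃ m, PySem.List.max? ft (fun x => x) = some m := by
      cases hq : PySem.List.max? ft (fun x => x) with
      | none => exact absurd ((PySem.List.max?_eq_none_iff ft (fun x => x)).mp hq) hft
      | some m => exact ⟨m, rfl⟩
    have hmnMin : ∀ y ∈ ft, mn ≤ y := PySem.List.min?_isMin hmn
    have hmxMax : ∀ y ∈ ft, y ≤ mx := PySem.List.max?_isMax hmx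
    have hmnmx : mn ≤ mx := le_trans (hmnMin mx (PySem.List.max?_mem hmx)) le_rfl
    set n : Int := (ft.length : Int) with hn
    have hnpos : (0:Int) < n := by rw [hn]; exact_mod_cast hm
    set lo := min mn (PySem.Int.floordiv k n) with hlo
    set p := pvBS ft k lo mx with hp
    have hgood : pvCost ft p ≤ k ∧ k < pvCost ft (p + 1) := by
      apply pvBS_good
      · rw [hlo]; omega
      · have h1 : pvCost ft lo = lo * n := by
          rw [pvCost_const ft lo (fun x hx => le_trans (by rw [hlo]; omega) (hmnMin x hx))]
        have h2 : PySem.Int.floordiv k n * n + PySem.Int.mod k n = k :=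
          PySem.Int.floordiv_mul_add_mod k n
        have h3 : 0 ≤ PySem.Int.mod k n := PySem.Int.mod_nonneg k hnpos
        have h4 : lo ≤ PySem.Int.floordiv k n := by rw [hlo]; omega
        have h5 : lo * n ≤ PySem.Int.floordiv k n * n :=
          mul_le_mul_of_nonneg_right h4 (by omega)
        omega
      · rw [pvCost_sum ft (mx + 1) (fun x hx => by have := hmxMax x hx; omega)]
        omega
    -- ===== apply the scan formula with that p =====
    set L := PySem.List.sorted (PySem.List.enumerate ft 0) (fun x => x.2) false with hL
    have hLperm : L.Perm (PySem.List.enumerate ft 0) := PySem.List.sorted_perm _ _ _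
    have hLsnd : (L.map Prod.snd).Perm ft := by
      have := hLperm.map Prod.snd
      rwa [PySem.List.map_snd_enumerate] at this
    have hcostL : ∀ q, pvCost (L.map Prod.snd) q = pvCost ft q :=
      fun q => pvCost_perm _ _ q hLsnd
    have hsumL : (L.map Prod.snd).sum = ft.sum := hLsnd.sum_eq
    rw [scan_formula L k 0 p (PySem.List.sorted_pairwise _ _) (by rw [hsumL]; omega)
      (by rw [hcostL]; omega) (by rw [hcostL]; omega)]
    -- survivors list: the strictly index-increasing filter of enumerate names the sorted order
    have hsurv : PySem.List.sorted ((L.filter (fun x => decide (p < x.2))).map Prod.fst)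
        (fun x => x) false
        = ((PySem.List.enumerate ft 0).filter (fun x => decide (p < x.2))).map Prod.fst := by
      apply PySem.List.sorted_eq_of_perm_of_pairwise_lt
      · exact ((hLperm.filter _).map Prod.fst).symm
      · rw [List.pairwise_map]
        exact List.Pairwise.sublist List.filter_sublist
          (PySem.List.pairwise_lt_enumerate ft 0)
    rw [hsurv, hcostL]
    simp only [hmn, hmx, Option.getD_some]
    rw [show k - (pvCost ft p - 0 * (L.length : Int)) = k - pvCost ft p from by ring, ← hlo, ← hp]
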